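-- pv_equiv track=rewrite | github.com/SeisSol/PSpaMM | pspamm/scripts/max_arm.py | getBlocksize
-- ===== SOURCE A (Python) =====
-- def getBlocksize(m , n, bk, v_size, prec):
--
-- 	bm = 2
-- 	bn = 1
-- 	maxval = 0
--
-- 	for i in range(v_size, m+1, v_size):
-- 		for j in range(1, n+1):
-- 			if ARM_condition(i, j, bk, v_size):
-- 				if i*j > maxval:
-- 					maxval = i*j
-- 					bm = i
-- 					bn = j
--
-- 	while ARM_condition(bm, bn, bk+1, v_size):
-- 		bk += 1
--
-- 	return (bm, bn, bk)
--
-- def ARM_condition(bm, bn, bk, v_size):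
--   # ceiling division
--   vm = -(bm // -v_size)
--   return (bn+bk) * vm + bn*bk <= 32
-- ===== SOURCE B (Python) =====
-- def getBlocksize(m, n, bk, v_size, prec):
--     # one pass over i only: best j per i in closed form; while-loop replaced by a formula
--     bm, bn, maxval = 2, 1, 0
--     for i in range(v_size, m + 1, v_size):
--         vm = -(i // -v_size)
--         if vm + bk > 0:
--             jb = min(n, (32 - bk * vm) // (vm + bk))
--         else:
--             jb = n if n >= 1 and (n + bk) * vm + n * bk <= 32 else 0
--         if jb >= 1 and i * jb > maxval:
--             bm, bn, maxval = i, jb, i * jb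
--     vmf = -(bm // -v_size)
--     kmax = (32 - bn * vmf) // (vmf + bn)
--     return (bm, bn, max(bk, kmax))
-- ===== Notes on version B (the rewrite author's own statement) =====
-- stated objective: faster
-- what changed: B drops the inner j-scan, computing the best feasible j for each vector-length i in closed form (case split on the sign of vm+bk), and replaces the trailing while loop by a single floor-division formula, leaving only the outer loop over i.
-- outside the precondition, e.g. on getBlocksize(0, 1, -40, -1, ''): A returns (2, 1, -40), B returns (2, 1, -34)
import Mathlib
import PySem

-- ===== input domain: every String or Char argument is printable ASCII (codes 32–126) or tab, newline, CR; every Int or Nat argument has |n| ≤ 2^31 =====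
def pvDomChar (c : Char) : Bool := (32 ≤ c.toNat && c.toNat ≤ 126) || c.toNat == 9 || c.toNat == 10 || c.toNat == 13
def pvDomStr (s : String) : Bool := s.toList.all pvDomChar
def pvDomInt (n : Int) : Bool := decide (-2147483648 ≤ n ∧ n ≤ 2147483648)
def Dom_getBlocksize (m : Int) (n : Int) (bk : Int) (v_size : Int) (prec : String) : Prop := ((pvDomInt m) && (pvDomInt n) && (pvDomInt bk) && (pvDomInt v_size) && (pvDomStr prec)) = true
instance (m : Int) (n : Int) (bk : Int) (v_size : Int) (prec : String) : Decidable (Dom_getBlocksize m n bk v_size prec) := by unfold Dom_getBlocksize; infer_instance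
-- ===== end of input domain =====

-- B replaces the inner j-scan with a closed-form best feasible j per i and the
-- trailing while loop with a floor-division formula (objective: faster).
-- ===== PORT A =====
def pvARM (bm : Int) (bn : Int) (bk : Int) (v_size : Int) : Bool :=
  let vm : Int := -(PySem.Int.floordiv bm (-v_size))
  decide ((bn + bk) * vm + bn * bk ≤ 32)

-- the 'while' loop of A; fuel (33 - bk).toNat suffices on Pre_ (proved below)
def pvWhileA (bm : Int) (bn : Int) (v_size : Int) (bk : Int) : Nat → Int
  | 0 => bk
  | fuel+1 => if pvARM bm bn (bk + 1) v_size then pvWhileA bm bn v_size (bk + 1) fuel else bk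

def getBlocksize (m : Int) (n : Int) (bk : Int) (v_size : Int) (prec : String) : List Int :=
  let s :=
    (PySem.List.pyRange v_size (m + 1) v_size).foldl
      (fun s i =>
        (PySem.List.pyRange 1 (n + 1) 1).foldl
          (fun s j =>
            if pvARM i j bk v_size then
              if i * j > s.2.2 then (i, j, i * j) else s
            else s) s)
      (2, 1, 0)
  [s.1, s.2.1, pvWhileA s.1 s.2.1 v_size bk (33 - bk).toNat]

-- ===== PORT B =====
def pvStepB (n : Int) (bk : Int) (v_size : Int) (s : Int × Int × Int) (i : Int) : Int × Int × Int :=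
  let vm : Int := -(PySem.Int.floordiv i (-v_size))
  let jb : Int :=
    if vm + bk > 0 then min n (PySem.Int.floordiv (32 - bk * vm) (vm + bk))
    else if 1 ≤ n ∧ (n + bk) * vm + n * bk ≤ 32 then n else 0
  if 1 ≤ jb ∧ i * jb > s.2.2 then (i, jb, i * jb) else s

def getBlocksize_alt (m : Int) (n : Int) (bk : Int) (v_size : Int) (prec : String) : List Int :=
  let s := (PySem.List.pyRange v_size (m + 1) v_size).foldl (pvStepB n bk v_size) (2, 1, 0)
  let vmf : Int := -(PySem.Int.floordiv s.1 (-v_size))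
  let kmax : Int := PySem.Int.floordiv (32 - s.2.1 * vmf) (vmf + s.2.1)
  [s.1, s.2.1, max bk kmax]

-- ===== PRECONDITION & SPEC =====
-- Pre_ excludes v_size ≤ 0: v_size = 0 raises ValueError in range, and for negative
-- v_size the trailing while loop of A diverges on many inputs; negative vector sizes
-- are outside the natural domain of this ARM blocksize search.
def Pre_getBlocksize (m : Int) (n : Int) (bk : Int) (v_size : Int) (prec : String) : Prop := 1 ≤ v_size
instance (m : Int) (n : Int) (bk : Int) (v_size : Int) (prec : String) : Decidable (Pre_getBlocksize m n bk v_size prec) := by unfold Pre_getBlocksize; infer_instance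
def pvWitness_getBlocksize : Int × Int × Int × Int × String := (8, 4, 2, 4, "d")

def Spec_getBlocksize (m : Int) (n : Int) (bk : Int) (v_size : Int) (prec : String) (out : List Int) : Prop := out = getBlocksize_alt m n bk v_size prec
instance (m : Int) (n : Int) (bk : Int) (v_size : Int) (prec : String) (out : List Int) : Decidable (Spec_getBlocksize m n bk v_size prec out) := by unfold Spec_getBlocksize; infer_instance

-- ===== CLAIM (what is proved, stated in full; the proofs are below) =====
def Claim_equal_getBlocksize : Prop := ∀ (m : Int) (n : Int) (bk : Int) (v_size : Int) (prec : String), Dom_getBlocksize m n bk v_size prec → Pre_getBlocksize m n bk v_size prec → Spec_getBlocksize m n bk v_size prec (getBlocksize m n bk v_size prec)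

-- ===== LEMMAS AND PROOFS =====

-- greatest j in [1, n] with c j (proof-side characterisation of A's inner scan)
def pvMaxFeas (c : Int → Bool) (n : Int) : Option Int :=
  if h : n < 1 then none
  else if c n then some n else pvMaxFeas c (n - 1)
termination_by n.toNat
decreasing_by omega

theorem pvMaxFeas_mem (c : Int → Bool) (n : Int) :
    ∀ j, pvMaxFeas c n = some j → 1 ≤ j ∧ j ≤ n ∧ c j = true := by
  induction n using pvMaxFeas.induct c with
  | case1 n h => intro j hj; rw [pvMaxFeas] at hj; simp [h] at hj
  | case2 n h hc =>
      intro j hj; rw [pvMaxFeas] at hj; simp [h, hc] at hj; subst hj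
      exact ⟨by omega, le_refl _, hc⟩
  | case3 n h hc ih =>
      intro j hj; rw [pvMaxFeas] at hj; simp [h, hc] at hj
      obtain ⟨h1, h2, h3⟩ := ih j hj
      exact ⟨h1, by omega, h3⟩

theorem inner_eq (c : Int → Bool) (i : Int) (hi : 1 ≤ i) :
    ∀ (N : Nat) (n : Int), n.toNat ≤ N → ∀ (s : Int × Int × Int),
    (PySem.List.pyRange 1 (n + 1) 1).foldl
      (fun s j => if c j then (if i * j > s.2.2 then (i, j, i * j) else s) else s) s
    = (match pvMaxFeas c n with
       | none => s
       | some jb => if i * jb > s.2.2 then (i, jb, i * jb) else s) := by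
  intro N
  induction N with
  | zero =>
      intro n hn s
      have h1 : n < 1 := by omega
      rw [PySem.List.pyRange_one_eq_nil (by omega : n + 1 ≤ 1)]
      simp [pvMaxFeas, h1]
  | succ N ih =>
      intro n hn s
      by_cases h1 : n < 1
      · rw [PySem.List.pyRange_one_eq_nil (by omega : n + 1 ≤ 1)]
        simp [pvMaxFeas, h1]
      · have hsplit : PySem.List.pyRange 1 (n + 1) 1 = PySem.List.pyRange 1 n 1 ++ [n] :=
          PySem.List.pyRange_one_succ_right (by omega)
        have hn' : PySem.List.pyRange 1 n 1 = PySem.List.pyRange 1 ((n - 1) + 1) 1 := by norm_num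
        rw [hsplit, List.foldl_append, hn', ih (n - 1) (by omega) s]
        conv_rhs => rw [pvMaxFeas]
        rw [dif_neg h1]
        simp only [List.foldl_cons, List.foldl_nil]
        rcases hm : pvMaxFeas c (n - 1) with _ | jb
        · by_cases hc : c n <;> simp [hc]
        · obtain ⟨hj1, hj2, _⟩ := pvMaxFeas_mem c (n - 1) jb hm
          have hlt : i * jb < i * n := mul_lt_mul_of_pos_left (by omega) (by omega)
          by_cases hc : c n
          · simp only [hc, if_true]
            by_cases hup : i * jb > s.2.2
            · simp only [hup, if_true]
              simp [show i * n > i * jb by omega, show s.2.2 < i * n by omega]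
            · simp [hup]
          · simp [hc]

theorem pvMaxFeas_upper (c : Int → Bool) (J : Int) (hc : ∀ j, c j = decide (j ≤ J)) (n : Int) :
    pvMaxFeas c n = if 1 ≤ min n J then some (min n J) else none := by
  induction n using pvMaxFeas.induct c with
  | case1 n h => rw [pvMaxFeas, dif_pos h, if_neg (by omega : ¬ 1 ≤ min n J)]
  | case2 n h hcn =>
      have hJ : n ≤ J := by have := hcn; rw [hc] at this; simpa using this
      rw [pvMaxFeas, dif_neg h, if_pos hcn]
      have hm : min n J = n := by omega
      rw [hm, if_pos (by omega : 1 ≤ n)]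
  | case3 n h hcn ih =>
      have hJ : ¬ n ≤ J := by have := hcn; rw [hc] at this; simpa using this
      rw [pvMaxFeas, dif_neg h, if_neg hcn, ih]
      have hm : min (n - 1) J = min n J := by omega
      rw [hm]

theorem pvMaxFeas_mono (c : Int → Bool) (hc : ∀ j k : Int, j ≤ k → c j = true → c k = true) (n : Int) :
    pvMaxFeas c n = if 1 ≤ n ∧ c n = true then some n else none := by
  induction n using pvMaxFeas.induct c with
  | case1 n h =>
      rw [pvMaxFeas, dif_pos h, if_neg (fun hcc => absurd hcc.1 (by omega))]
  | case2 n h hcn =>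
      rw [pvMaxFeas, dif_neg h, if_pos hcn, if_pos ⟨by omega, hcn⟩]
  | case3 n h hcn ih =>
      have hprev : ¬ (c (n - 1) = true) := fun hp => hcn (hc (n - 1) n (by omega) hp)
      rw [pvMaxFeas, dif_neg h, if_neg hcn, ih,
        if_neg (fun hcc => hprev hcc.2), if_neg (fun hcc => hcn hcc.2)]

theorem step_eq (n : Int) (bk : Int) (v_size : Int) (i : Int) (hi : 1 ≤ i) (s : Int × Int × Int) :
    (PySem.List.pyRange 1 (n + 1) 1).foldl
      (fun s j =>
        if pvARM i j bk v_size then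
          if i * j > s.2.2 then (i, j, i * j) else s
        else s) s
    = pvStepB n bk v_size s i := by
  have hbody : ∀ (j : Int), pvARM i j bk v_size
      = decide ((j + bk) * (-(PySem.Int.floordiv i (-v_size))) + j * bk ≤ 32) := by
    intro j; unfold pvARM; congr 1
  set vm : Int := -(PySem.Int.floordiv i (-v_size)) with hvm
  rw [inner_eq (fun j => pvARM i j bk v_size) i hi n.toNat n le_rfl s]
  by_cases hd : vm + bk > 0
  · -- feasible j are exactly j ≤ jmax
    set jmax : Int := PySem.Int.floordiv (32 - bk * vm) (vm + bk) with hjm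
    have hiff : ∀ j : Int, (pvARM i j bk v_size) = decide (j ≤ jmax) := by
      intro j
      rw [hbody j]
      have h1 : ((j + bk) * vm + j * bk ≤ 32) ↔ (j ≤ jmax) := by
        rw [hjm, PySem.Int.le_floordiv_iff_mul_le hd]
        constructor <;> intro h <;> nlinarith
      simp [h1]
    rw [pvMaxFeas_upper _ jmax hiff n]
    unfold pvStepB
    rw [← hvm]
    simp only [hd, if_true]
    rw [← hjm]
    by_cases hb : 1 ≤ min n jmax
    · simp only [hb, if_true]
      by_cases hup : i * min n jmax > s.2.2
      · simp [hb, hup]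
      · simp [hb, hup]
    · simp only [hb, if_false]
      have : ¬ (1 ≤ min n jmax ∧ i * min n jmax > s.2.2) := fun h => hb h.1
      simp [this]
  · -- slope ≤ 0: feasibility is upward closed in j
    have hmono : ∀ j k : Int, j ≤ k → (pvARM i j bk v_size) = true → (pvARM i k bk v_size) = true := by
      intro j k hjk hj
      rw [hbody] at hj ⊢
      simp only [decide_eq_true_eq] at hj ⊢
      nlinarith [mul_nonpos_of_nonneg_of_nonpos (by omega : (0:Int) ≤ k - j) (by omega : vm + bk ≤ 0)]
    rw [pvMaxFeas_mono _ hmono n]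
    unfold pvStepB
    rw [← hvm]
    simp only [hd, if_false]
    have hcn : (pvARM i n bk v_size = true) ↔ ((n + bk) * vm + n * bk ≤ 32) := by
      rw [hbody n]; simp
    by_cases hb : 1 ≤ n ∧ (n + bk) * vm + n * bk ≤ 32
    · have : (1 ≤ n ∧ pvARM i n bk v_size = true) := ⟨hb.1, hcn.mpr hb.2⟩
      simp only [this, if_true, hb]
      by_cases hup : i * n > s.2.2
      · simp [hb, hup]
      · simp [hb, hup]
    · have h2 : ¬ (1 ≤ n ∧ pvARM i n bk v_size = true) := fun h => hb ⟨h.1, hcn.mp h.2⟩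
      simp only [h2, if_false, hb]
      have : ¬ (1 ≤ (0:Int) ∧ i * 0 > s.2.2) := by simp
      simp [this]

theorem foldl_inv {α σ : Type} (P : σ → Prop) (f : σ → α → σ) (l : List α) (init : σ)
    (h0 : P init) (hstep : ∀ s a, a ∈ l → P s → P (f s a)) : P (l.foldl f init) := by
  induction l generalizing init with
  | nil => exact h0
  | cons x xs ih =>
      exact ih (f init x) (hstep init x (List.mem_cons_self) h0)
        (fun s a ha hs => hstep s a (List.mem_cons_of_mem x ha) hs)

theorem ceil_pos (bm v_size : Int) (hb : 1 ≤ bm) (hv : 1 ≤ v_size) :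
    1 ≤ -(PySem.Int.floordiv bm (-v_size)) := by
  have h1 : PySem.Int.floordiv bm (-v_size) = PySem.Int.floordiv (-bm) v_size := by
    have := PySem.Int.floordiv_neg_neg (-bm) v_size
    simpa using this
  rw [h1]
  set q : Int := -(PySem.Int.floordiv (-bm) v_size) with hq
  have := (PySem.Int.neg_floordiv_neg_eq_iff_of_pos (by omega : (0:Int) < v_size)
      (a := bm) (q := q)).mp hq.symm
  obtain ⟨_, h3⟩ := this
  by_contra hcon
  push_neg at hcon
  have : q * v_size ≤ 0 := mul_nonpos_of_nonpos_of_nonneg (by omega) (by omega)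
  omega

theorem while_eq (bm bn v_size : Int) (hb : 1 ≤ bm) (hn : 1 ≤ bn) (hv : 1 ≤ v_size) (bk : Int) :
    pvWhileA bm bn v_size bk (33 - bk).toNat
      = max bk (PySem.Int.floordiv (32 - bn * (-(PySem.Int.floordiv bm (-v_size))))
          ((-(PySem.Int.floordiv bm (-v_size))) + bn)) := by
  set vm : Int := -(PySem.Int.floordiv bm (-v_size)) with hvm
  have hvm1 : 1 ≤ vm := ceil_pos bm v_size hb hv
  have hd : (0:Int) < vm + bn := by omega
  set kmax : Int := PySem.Int.floordiv (32 - bn * vm) (vm + bn) with hk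
  have hker : ∀ k : Int, (pvARM bm bn k v_size = true) ↔ k ≤ kmax := by
    intro k
    unfold pvARM
    rw [← hvm]
    simp only [decide_eq_true_eq]
    rw [hk, PySem.Int.le_floordiv_iff_mul_le hd]
    constructor <;> intro h <;> nlinarith
  have hkub : kmax ≤ 32 := by
    have h1 : kmax * (vm + bn) ≤ 32 - bn * vm :=
      (PySem.Int.le_floordiv_iff_mul_le hd).mp (le_of_eq hk)
    have h2 : 1 ≤ bn * vm := by nlinarith
    by_contra hcon
    push_neg at hcon
    nlinarith
  have haux : ∀ (fuel : Nat) (b : Int), kmax ≤ b + fuel →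
      pvWhileA bm bn v_size b fuel = max b kmax := by
    intro fuel
    induction fuel with
    | zero => intro b hfb; simp at hfb; unfold pvWhileA; omega
    | succ f ih =>
        intro b hfb
        unfold pvWhileA
        by_cases hc : pvARM bm bn (b + 1) v_size = true
        · have h1 : b + 1 ≤ kmax := (hker (b + 1)).mp hc
          rw [if_pos hc, ih (b + 1) (by push_cast at hfb ⊢; omega)]
          omega
        · have h1 : ¬ (b + 1 ≤ kmax) := fun h => hc ((hker (b + 1)).mpr h)
          rw [if_neg hc]
          omega
  exact haux (33 - bk).toNat bk (by omega)

-- ===== VERDICT (by name: the statement is the Claim_ definition above) =====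
theorem getBlocksize_spec : Claim_equal_getBlocksize := by
  intro m n bk v_size prec hdom hpre
  have hv : 1 ≤ v_size := hpre
  simp only [Spec_getBlocksize, getBlocksize, getBlocksize_alt]
  have hmem : ∀ i : Int, i ∈ PySem.List.pyRange v_size (m + 1) v_size → 1 ≤ i := by
    intro i hi
    have := (PySem.List.mem_pyRange_iff_of_pos (by omega : (0:Int) < v_size) i).mp hi
    omega
  have hfold :
      (PySem.List.pyRange v_size (m + 1) v_size).foldl
        (fun s i =>
          (PySem.List.pyRange 1 (n + 1) 1).foldl
            (fun s j =>
              if pvARM i j bk v_size then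
                if i * j > s.2.2 then (i, j, i * j) else s
              else s) s)
        (2, 1, 0)
      = (PySem.List.pyRange v_size (m + 1) v_size).foldl (pvStepB n bk v_size) (2, 1, 0) := by
    apply PySem.List.foldl_congr_mem
    intro s i hi
    exact step_eq n bk v_size i (hmem i hi) s
  rw [hfold]
  set s := (PySem.List.pyRange v_size (m + 1) v_size).foldl (pvStepB n bk v_size) (2, 1, 0) with hs
  have hinv : 1 ≤ s.1 ∧ 1 ≤ s.2.1 := by
    rw [hs]
    apply foldl_inv (fun s : Int × Int × Int => 1 ≤ s.1 ∧ 1 ≤ s.2.1)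
    · exact ⟨by norm_num, by norm_num⟩
    · intro t i hi ht
      unfold pvStepB
      by_cases hcond : 1 ≤ (if -(PySem.Int.floordiv i (-v_size)) + bk > 0 then
            min n (PySem.Int.floordiv (32 - bk * -(PySem.Int.floordiv i (-v_size)))
              (-(PySem.Int.floordiv i (-v_size)) + bk))
          else if 1 ≤ n ∧ (n + bk) * -(PySem.Int.floordiv i (-v_size)) + n * bk ≤ 32 then n else 0) ∧
          i * (if -(PySem.Int.floordiv i (-v_size)) + bk > 0 then
            min n (PySem.Int.floordiv (32 - bk * -(PySem.Int.floordiv i (-v_size)))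
              (-(PySem.Int.floordiv i (-v_size)) + bk))
          else if 1 ≤ n ∧ (n + bk) * -(PySem.Int.floordiv i (-v_size)) + n * bk ≤ 32 then n else 0) > t.2.2
      · simp only [hcond, if_true]
        exact ⟨hmem i hi, hcond.1⟩
      · simp only [hcond, if_false]
        exact ht
  rw [while_eq s.1 s.2.1 v_size hinv.1 hinv.2 hv bk]
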